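-- pv_equiv track=rewrite | github.com/Ectario/bitflipper | checker.py | check_same_block
-- ===== SOURCE A (Python) =====
-- def check_same_block(index_begin, index_end, block_size=16):
--     """
--     Given a block size, check if the two indices are in the same block
--
--     :param index_begin: the index of the first element to change in the plaintext
--     :param index_end: the index of the boundary (excluded!)
--     :param block_size: the size of the block to be checked, defaults to 16 (optional)
--     """
--     if index_end - index_begin > block_size:
--         return False
--
--     index_block = index_begin // block_size
--     for x in range(index_begin + 1, index_end):
--         if x // block_size != index_block:
--             return False
--
--     return True
-- ===== SOURCE B (Python) =====
-- def check_same_block(index_begin, index_end, block_size=16):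
--     """A contiguous range fits in one block iff the begin offset within its
--     block plus the span does not run past the block end; no per-index loop."""
--     span = index_end - index_begin
--     if span > block_size:
--         return False
--     offset = index_begin % block_size
--     return span <= 0 or offset + span <= block_size
-- ===== Notes on version B (the rewrite author's own statement) =====
-- stated objective: simpler
-- what changed: Replaces the per-index loop comparing each index's block with a closed-form offset check: the begin index's offset within its block plus the range length must not exceed the block size.
import Mathlib
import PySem

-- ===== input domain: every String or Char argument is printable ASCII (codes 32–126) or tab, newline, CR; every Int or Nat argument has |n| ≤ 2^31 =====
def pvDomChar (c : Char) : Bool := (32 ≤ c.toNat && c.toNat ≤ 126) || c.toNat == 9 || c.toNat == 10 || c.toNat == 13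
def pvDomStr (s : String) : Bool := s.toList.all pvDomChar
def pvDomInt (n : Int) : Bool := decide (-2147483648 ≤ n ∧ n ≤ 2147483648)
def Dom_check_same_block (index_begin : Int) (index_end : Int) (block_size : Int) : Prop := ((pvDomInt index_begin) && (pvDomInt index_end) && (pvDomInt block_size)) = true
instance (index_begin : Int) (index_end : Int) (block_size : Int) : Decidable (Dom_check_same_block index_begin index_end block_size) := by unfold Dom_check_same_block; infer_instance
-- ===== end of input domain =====

-- B replaces A's per-index loop by a closed-form offset check: the begin index's
-- offset within its block plus the span must fit in the block (objective: simpler).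

-- ===== PORT A =====
def check_same_block (index_begin : Int) (index_end : Int) (block_size : Int) : Bool :=
  if index_end - index_begin > block_size then false
  else
    let index_block := PySem.Int.floordiv index_begin block_size
    -- for x in range(index_begin+1, index_end): if x // block_size != index_block: return False
    (PySem.List.pyRange (index_begin + 1) index_end 1).all
      (fun x => PySem.Int.floordiv x block_size == index_block)

-- ===== PORT B =====
def check_same_block_alt (index_begin : Int) (index_end : Int) (block_size : Int) : Bool :=
  let span := index_end - index_begin
  if span > block_size then false
  else
    let offset := PySem.Int.mod index_begin block_size
    decide (span ≤ 0) || decide (offset + span ≤ block_size)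

-- ===== PRECONDITION & SPEC =====
-- Pre_ excludes exactly the inputs where Python A raises ZeroDivisionError
-- (block_size == 0 with an empty range, which reaches the division); B raises there too.
def Pre_check_same_block (index_begin : Int) (index_end : Int) (block_size : Int) : Prop :=
  ¬ (block_size = 0 ∧ index_end ≤ index_begin)
instance (index_begin : Int) (index_end : Int) (block_size : Int) : Decidable (Pre_check_same_block index_begin index_end block_size) := by unfold Pre_check_same_block; infer_instance

def pvWitness_check_same_block : Int × Int × Int := (3, 7, 16)

def Spec_check_same_block (index_begin : Int) (index_end : Int) (block_size : Int) (out : Bool) : Prop := out = check_same_block_alt index_begin index_end block_size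
instance (index_begin : Int) (index_end : Int) (block_size : Int) (out : Bool) : Decidable (Spec_check_same_block index_begin index_end block_size out) := by unfold Spec_check_same_block; infer_instance

-- ===== CLAIM =====
def Claim_equal_check_same_block : Prop := ∀ (index_begin : Int) (index_end : Int) (block_size : Int), Dom_check_same_block index_begin index_end block_size → Pre_check_same_block index_begin index_end block_size → Spec_check_same_block index_begin index_end block_size (check_same_block index_begin index_end block_size)

-- ===== LEMMAS AND PROOFS =====

-- For a positive divisor, all indices of (b, e) share b's block iff the last one does.
theorem pv_all_iff_last (b e bs : Int) (hbs : 0 < bs) (hlt : b < e) :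
    ((∀ x, b + 1 ≤ x → x < e → x / bs = b / bs) ↔ (e - 1) / bs = b / bs) := by
  constructor
  · intro h
    rcases eq_or_lt_of_le (by omega : b + 1 ≤ e) with he | he
    · have : e - 1 = b := by omega
      rw [this]
    · exact h (e - 1) (by omega) (by omega)
  · intro h x hx1 hx2
    have h1 : b / bs ≤ x / bs := Int.ediv_le_ediv hbs (by omega)
    have h2 : x / bs ≤ (e - 1) / bs := Int.ediv_le_ediv hbs (by omega)
    omega

-- The last index shares b's block iff b's in-block offset plus the span fits.
theorem pv_last_iff_offset (b e bs : Int) (hbs : 0 < bs) (hlt : b < e) :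
    ((e - 1) / bs = b / bs ↔ b % bs + (e - b) ≤ bs) := by
  have hdm : bs * (b / bs) + b % bs = b := Int.mul_ediv_add_emod b bs
  have hr0 : 0 ≤ b % bs := Int.emod_nonneg b (by omega)
  have hr1 : b % bs < bs := Int.emod_lt_of_pos b hbs
  constructor
  · intro h
    have hdm' : bs * ((e - 1) / bs) + (e - 1) % bs = e - 1 := Int.mul_ediv_add_emod (e - 1) bs
    rw [h] at hdm'
    have hr1' : (e - 1) % bs < bs := Int.emod_lt_of_pos (e - 1) hbs
    linarith
  · intro h
    have h1 : b / bs ≤ (e - 1) / bs := Int.ediv_le_ediv hbs (by omega)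
    have h2 : (e - 1) / bs < b / bs + 1 := by
      rw [Int.ediv_lt_iff_lt_mul hbs]
      nlinarith
    omega

-- ===== VERDICT =====
theorem check_same_block_spec : Claim_equal_check_same_block := by
  intro b e bs _ hpre
  unfold Spec_check_same_block check_same_block check_same_block_alt
  by_cases hguard : e - b > bs
  · simp [hguard]
  · simp only [hguard, if_false]
    by_cases hemp : e - b ≤ 0
    · have : PySem.List.pyRange (b + 1) e 1 = [] := by
        apply List.eq_nil_iff_forall_not_mem.2
        intro x hx
        rw [PySem.List.mem_pyRange_one] at hx
        omega
      simp [this, hemp]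
    · have hlt : b < e := by omega
      have hbs : 0 < bs := by omega
      have hspan : ¬ (e - b ≤ 0) := hemp
      rw [Bool.eq_iff_iff]
      simp only [List.all_eq_true, PySem.List.mem_pyRange_one, beq_iff_eq, and_imp,
        PySem.Int.floordiv_eq_ediv_of_pos hbs, PySem.Int.mod_eq_emod_of_pos hbs,
        Bool.or_eq_true, decide_eq_true_eq, hspan, false_or]
      rw [pv_all_iff_last b e bs hbs hlt, pv_last_iff_offset b e bs hbs hlt]
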